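-- pv_equiv track=rewrite | github.com/taoyl/vlogai | vlogai/vai.py | recursive_expand_intf
-- ===== SOURCE A (Python) =====
-- def recursive_expand_intf(intf_defs, mod):
--     if mod not in intf_defs:
--         return []
--
--     intf_port_list = []
--     for instp, _, intf in intf_defs[mod]:
--         if intf not in ('input', 'output'):
--             intf_port_list += [f'{instp}_{x}' for x in recursive_expand_intf(intf_defs, intf)]
--         else:
--             intf_port_list.append(instp)
--     return intf_port_list
-- ===== SOURCE B (Python) =====
-- def recursive_expand_intf(intf_defs, mod):
--     # Bottom-up fixpoint iteration: compute the expansion of every interface in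
--     # rounds (round r = expansion truncated at depth r) instead of top-down
--     # recursion; stop as soon as the table stops changing.
--     exp = dict.fromkeys(intf_defs, [])
--     for _ in range(len(intf_defs) + 1):
--         nxt = {}
--         for k, entries in intf_defs.items():
--             ports = []
--             for instp, _, intf in entries:
--                 if intf in ('input', 'output'):
--                     ports.append(instp)
--                 else:
--                     ports.extend(instp + '_' + x for x in exp.get(intf, []))
--             nxt[k] = ports
--         if nxt == exp:
--             break
--         exp = nxt
--     return exp.get(mod, [])
-- ===== Notes on version B (the rewrite author's own statement) =====
-- stated objective: alternative
-- what changed: Replaces A's top-down recursion (which re-prefixes each returned sublist at every level) with a bottom-up fixpoint iteration: a table mapping every interface to its expansion is recomputed one level deeper until it stops changing (at most len(intf_defs)+1 rounds), then the answer is read off for mod; B is also total on cyclic interface graphs where A overflows the stack.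
import Mathlib
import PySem

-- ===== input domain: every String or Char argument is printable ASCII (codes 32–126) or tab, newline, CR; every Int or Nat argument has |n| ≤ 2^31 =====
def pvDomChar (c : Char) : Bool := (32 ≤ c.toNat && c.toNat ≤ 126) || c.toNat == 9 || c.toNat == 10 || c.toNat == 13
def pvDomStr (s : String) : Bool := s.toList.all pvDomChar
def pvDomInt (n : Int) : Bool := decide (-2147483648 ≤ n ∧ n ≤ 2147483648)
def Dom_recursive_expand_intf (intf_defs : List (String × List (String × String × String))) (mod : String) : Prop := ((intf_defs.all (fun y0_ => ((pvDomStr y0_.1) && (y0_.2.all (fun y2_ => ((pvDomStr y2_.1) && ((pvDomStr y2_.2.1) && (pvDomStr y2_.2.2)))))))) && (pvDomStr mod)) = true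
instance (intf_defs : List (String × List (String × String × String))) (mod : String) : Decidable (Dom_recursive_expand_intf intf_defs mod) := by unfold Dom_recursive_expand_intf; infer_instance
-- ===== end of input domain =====

-- B replaces A's top-down recursion by a bottom-up fixpoint iteration (dynamic programming
-- over rounds); objective: alternative algorithm of similar cost, total even on cyclic inputs.

-- ===== PORT A =====
-- Python A recurses through the interface graph; the Nat argument is a fuel bound
-- (number of dict entries + 1) that is never exhausted on acyclic inputs (Pre_).
def pvAExpand (defs : List (String × List (String × String × String))) : Nat → String → List String
  | 0, _ => []
  | Nat.succ f, m =>
    match (PySem.Dict.mk defs).get? m with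
    | none => []
    | some entries =>
      entries.foldl (fun acc e =>
        if ¬ (e.2.2 = "input" ∨ e.2.2 = "output") then
          acc ++ (pvAExpand defs f e.2.2).map (fun x => e.1 ++ "_" ++ x)
        else acc ++ [e.1]) []

def recursive_expand_intf (intf_defs : List (String × List (String × String × String))) (mod : String) : List String :=
  pvAExpand intf_defs (intf_defs.length + 1) mod

-- ===== PORT B =====
-- one round of Source B's fixpoint loop: recompute every key's port list one level deeper
def pvRound (defs : List (String × List (String × String × String)))
    (exp : PySem.Dict String (List String)) : PySem.Dict String (List String) :=
  defs.foldl (fun nxt kv =>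
    nxt.insert kv.1 (kv.2.foldl (fun ports e =>
      if e.2.2 = "input" ∨ e.2.2 = "output" then ports ++ [e.1]
      else ports ++ (exp.getD e.2.2 []).map (fun x => e.1 ++ "_" ++ x)) [])) PySem.Dict.empty

def recursive_expand_intf_alt (intf_defs : List (String × List (String × String × String))) (mod : String) : List String :=
  let exp0 : PySem.Dict String (List String) :=
    intf_defs.foldl (fun d kv => d.insert kv.1 []) PySem.Dict.empty
  -- the 'for _ in range(...): ... if nxt == exp: break' loop; the Bool is the break flag
  let final := (List.range (intf_defs.length + 1)).foldl
    (fun s _ => if s.2 then s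
      else
        let nxt := pvRound intf_defs s.1
        if nxt = s.1 then (s.1, true) else (nxt, false))
    (exp0, false)
  final.1.getD mod []

-- ===== PRECONDITION & SPEC =====
-- sub-interfaces directly referenced by module m (edges of the interface graph)
def pvSuccs (defs : List (String × List (String × String × String))) (m : String) : List String :=
  match (PySem.Dict.mk defs).get? m with
  | none => []
  | some es => es.filterMap (fun e => if e.2.2 = "input" ∨ e.2.2 = "output" then none else some e.2.2)

-- modules reachable from ms by following pvSuccs edges (fuel-bounded closure;
-- fuel = total number of entries + 1 reaches the fixpoint)
def pvReach (defs : List (String × List (String × String × String))) : Nat → List String → List String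
  | 0, ms => ms
  | Nat.succ f, ms => pvReach defs f (PySem.Set.ofList (ms ++ ms.flatMap (pvSuccs defs)))

def pvFuel (defs : List (String × List (String × String × String))) : Nat :=
  (defs.map (fun kv => kv.2.length)).sum + 1

-- Pre_ excludes (a) assoc lists with duplicate keys, which do not represent a Python dict
-- (Python A's argument is a dict, whose keys are unique), and (b) interface graphs with a
-- cycle reachable from mod, on which Python A raises RecursionError.
def Pre_recursive_expand_intf (intf_defs : List (String × List (String × String × String))) (mod : String) : Prop :=
  (intf_defs.map Prod.fst).Nodup ∧
  ∀ m ∈ pvReach intf_defs (pvFuel intf_defs) [mod],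
    m ∉ pvReach intf_defs (pvFuel intf_defs) (pvSuccs intf_defs m)

instance (intf_defs : List (String × List (String × String × String))) (mod : String) : Decidable (Pre_recursive_expand_intf intf_defs mod) := by unfold Pre_recursive_expand_intf; infer_instance

def pvWitness_recursive_expand_intf : (List (String × List (String × String × String))) × String :=
  ([("m", [("a", "w", "input"), ("b", "w", "s")]), ("s", [("c", "w", "output"), ("d", "w", "input")])], "m")

def Spec_recursive_expand_intf (intf_defs : List (String × List (String × String × String))) (mod : String) (out : List String) : Prop := out = recursive_expand_intf_alt intf_defs mod
instance (intf_defs : List (String × List (String × String × String))) (mod : String) (out : List String) : Decidable (Spec_recursive_expand_intf intf_defs mod out) := by unfold Spec_recursive_expand_intf; infer_instance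

-- ===== CLAIM (what is proved, stated in full; the proofs are below) =====
def Claim_equal_recursive_expand_intf : Prop := ∀ (intf_defs : List (String × List (String × String × String))) (mod : String), Dom_recursive_expand_intf intf_defs mod → Pre_recursive_expand_intf intf_defs mod → Spec_recursive_expand_intf intf_defs mod (recursive_expand_intf intf_defs mod)

-- ===== LEMMAS AND PROOFS =====

-- a loop inserting (key, g value) for every dict entry, read back at k
theorem pvFoldlInsertGetD (defs : List (String × List (String × String × String)))
    (g : List (String × String × String) → List String)
    (hnd : (defs.map Prod.fst).Nodup) (d : PySem.Dict String (List String)) (k : String) :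
    (defs.foldl (fun n kv => n.insert kv.1 (g kv.2)) d).getD k [] =
      match (PySem.Dict.mk defs).get? k with
      | none => d.getD k []
      | some es => g es := by
  induction defs generalizing d with
  | nil => simp [PySem.Dict.get?]
  | cons a rest ih =>
    simp only [List.map_cons, List.nodup_cons] at hnd
    rw [List.foldl_cons, ih hnd.2, PySem.Dict.get?_mk_cons]
    by_cases hk : a.1 = k
    · subst hk
      have : (PySem.Dict.mk rest).get? a.1 = none := by
        rw [PySem.Dict.get?_eq_none_iff_not_mem_keys]
        simpa using hnd.1
      simp [this, PySem.Dict.getD_insert_self]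
    · have hbe : (a.1 == k) = false := by simpa using hk
      rw [hbe]
      simp only [Bool.false_eq_true, if_false]
      cases h : (PySem.Dict.mk rest).get? k
      · exact PySem.Dict.getD_insert_of_ne d _ _ (fun h' => hk (Eq.symm h'))
      · rfl

theorem pvRound_getD (defs : List (String × List (String × String × String)))
    (hnd : (defs.map Prod.fst).Nodup) (r : Nat)
    (exp : PySem.Dict String (List String))
    (hexp : ∀ j, exp.getD j [] = pvAExpand defs r j) (k : String) :
    (pvRound defs exp).getD k [] = pvAExpand defs (r + 1) k := by
  unfold pvRound
  rw [pvFoldlInsertGetD defs _ hnd]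
  show (match (PySem.Dict.mk defs).get? k with
        | none => (PySem.Dict.empty : PySem.Dict String (List String)).getD k []
        | some es => es.foldl _ []) = _
  rw [show pvAExpand defs (r + 1) k =
      match (PySem.Dict.mk defs).get? k with
      | none => []
      | some entries => entries.foldl (fun acc e =>
          if ¬ (e.2.2 = "input" ∨ e.2.2 = "output") then
            acc ++ (pvAExpand defs r e.2.2).map (fun x => e.1 ++ "_" ++ x)
          else acc ++ [e.1]) [] from rfl]
  cases h : (PySem.Dict.mk defs).get? k
  · simp [PySem.Dict.getD_empty]
  · have hfun : (fun (ports : List String) (e : String × String × String) =>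
        if e.2.2 = "input" ∨ e.2.2 = "output" then ports ++ [e.1]
        else ports ++ (exp.getD e.2.2 []).map (fun x => e.1 ++ "_" ++ x)) =
        (fun (acc : List String) (e : String × String × String) =>
        if ¬ (e.2.2 = "input" ∨ e.2.2 = "output") then
          acc ++ (pvAExpand defs r e.2.2).map (fun x => e.1 ++ "_" ++ x)
        else acc ++ [e.1]) := by
      funext acc e
      by_cases hP : e.2.2 = "input" ∨ e.2.2 = "output"
      · simp [hP]
      · simp [hP, hexp]
    simp only [hfun]

-- loop invariant: after r rounds the table holds the depth-r expansions, and once the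
-- break flag is set the table is a fixpoint of pvRound
def pvGood (defs : List (String × List (String × String × String)))
    (s : PySem.Dict String (List String) × Bool) (r : Nat) : Prop :=
  (∀ k, s.1.getD k [] = pvAExpand defs r k) ∧ (s.2 = true → pvRound defs s.1 = s.1)

theorem pvStep_good (defs : List (String × List (String × String × String)))
    (hnd : (defs.map Prod.fst).Nodup) (r : Nat)
    (s : PySem.Dict String (List String) × Bool) (h : pvGood defs s r) :
    pvGood defs (if s.2 then s
      else
        let nxt := pvRound defs s.1
        if nxt = s.1 then (s.1, true) else (nxt, false)) (r + 1) := by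
  have hstep : ∀ k, (pvRound defs s.1).getD k [] = pvAExpand defs (r + 1) k :=
    pvRound_getD defs hnd r s.1 h.1
  by_cases hd : s.2
  · simp only [hd, if_true]
    refine ⟨fun k => ?_, h.2⟩
    rw [← h.2 hd]; exact hstep k
  · simp only [hd]
    by_cases hfix : pvRound defs s.1 = s.1
    · simp only [hfix, if_true]
      exact ⟨fun k => by rw [← hfix]; exact hstep k, fun _ => hfix⟩
    · simp only [hfix, if_false]
      exact ⟨hstep, fun hb => by simp at hb⟩

theorem pvFoldl_good (defs : List (String × List (String × String × String)))
    (hnd : (defs.map Prod.fst).Nodup) (l : List Nat) :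
    ∀ (r : Nat) (s : PySem.Dict String (List String) × Bool), pvGood defs s r →
    pvGood defs (l.foldl (fun s _ => if s.2 then s
      else
        let nxt := pvRound defs s.1
        if nxt = s.1 then (s.1, true) else (nxt, false)) s) (r + l.length) := by
  induction l with
  | nil => intro r s h; simpa using h
  | cons a t ih =>
    intro r s h
    rw [List.foldl_cons]
    have := ih (r + 1) _ (pvStep_good defs hnd r s h)
    simpa [Nat.add_assoc, Nat.add_comm 1 t.length] using this

theorem pvExp0_good (defs : List (String × List (String × String × String)))
    (hnd : (defs.map Prod.fst).Nodup) :
    pvGood defs (defs.foldl (fun d kv => d.insert kv.1 []) PySem.Dict.empty, false) 0 := by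
  refine ⟨fun k => ?_, fun hb => by simp at hb⟩
  rw [pvFoldlInsertGetD defs (fun _ => []) hnd]
  cases h : (PySem.Dict.mk defs).get? k <;> simp [PySem.Dict.getD_empty, pvAExpand]

-- ===== VERDICT (by name: the statement is the Claim_ definition above) =====
theorem recursive_expand_intf_spec : Claim_equal_recursive_expand_intf := by
  intro defs mod _ hpre
  unfold Spec_recursive_expand_intf recursive_expand_intf recursive_expand_intf_alt
  have h := (pvFoldl_good defs hpre.1 (List.range (defs.length + 1)) 0 _
    (pvExp0_good defs hpre.1)).1 mod
  simp only [List.length_range, Nat.zero_add] at h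
  exact h.symm
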